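-- pv_equiv track=rewrite | github.com/Farisiii/backendKDS | app/utils/visualization.py | extract_species_groups
-- ===== SOURCE A (Python) =====
-- from typing import List, Tuple, Dict
--
-- def extract_species_groups(sequence_ids: List[str]) -> Tuple[Dict[str, List[str]], Dict[str, str]]:
--     """Extract species groups and assign colors"""
--     colors = ['#2E86AB', '#A23B72', '#F18F01', '#C73E1D', '#8B5A2B',
--               '#6A994E', '#BC4749', '#7209B7', '#F72585', '#4CC9F0',
--               '#7B68EE', '#32CD32', '#FF6347', '#FFD700', '#DDA0DD']
--
--     species_groups = {}
--     species_colors = {}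
--     color_index = 0
--
--     for seq_id in sequence_ids:
--         # Extract species name from sequence ID
--         parts = seq_id.replace('_', ' ').split()
--         if len(parts) >= 2:
--             species = f"{parts[0]} {parts[1]}"
--         else:
--             species = parts[0] if parts else seq_id
--
--         if species not in species_groups:
--             species_groups[species] = []
--             species_colors[species] = colors[color_index % len(colors)]
--             color_index += 1
--         species_groups[species].append(seq_id)
--
--     return species_groups, species_colors
-- ===== SOURCE B (Python) =====
-- def extract_species_groups(sequence_ids):
--     """Extract species groups and assign colors"""
--     colors = ['#2E86AB', '#A23B72', '#F18F01', '#C73E1D', '#8B5A2B',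
--               '#6A994E', '#BC4749', '#7209B7', '#F72585', '#4CC9F0',
--               '#7B68EE', '#32CD32', '#FF6347', '#FFD700', '#DDA0DD']
--
--     def species_of(seq_id):
--         parts = seq_id.replace('_', ' ').split()
--         if len(parts) >= 2:
--             return parts[0] + ' ' + parts[1]
--         return parts[0] if parts else seq_id
--
--     # label every id with its species, dedupe the labels in first-appearance
--     # order, then GATHER each group by filtering the labelled list per species
--     pairs = [(seq_id, species_of(seq_id)) for seq_id in sequence_ids]
--     order = list(dict.fromkeys(sp for _, sp in pairs))
--     species_groups = {sp: [sid for sid, s in pairs if s == sp] for sp in order}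
--     species_colors = {sp: colors[i % len(colors)] for i, sp in enumerate(order)}
--     return species_groups, species_colors
-- ===== Notes on version B (the rewrite author's own statement) =====
-- stated objective: alternative
-- what changed: A builds both dicts incrementally in one loop with a color_index counter; B instead labels every id with its species (map), dedupes the labels in first-appearance order (dict.fromkeys), and then GATHERS each group by filtering the labelled list once per species, assigning colors by enumerating the deduped order.
import Mathlib
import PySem

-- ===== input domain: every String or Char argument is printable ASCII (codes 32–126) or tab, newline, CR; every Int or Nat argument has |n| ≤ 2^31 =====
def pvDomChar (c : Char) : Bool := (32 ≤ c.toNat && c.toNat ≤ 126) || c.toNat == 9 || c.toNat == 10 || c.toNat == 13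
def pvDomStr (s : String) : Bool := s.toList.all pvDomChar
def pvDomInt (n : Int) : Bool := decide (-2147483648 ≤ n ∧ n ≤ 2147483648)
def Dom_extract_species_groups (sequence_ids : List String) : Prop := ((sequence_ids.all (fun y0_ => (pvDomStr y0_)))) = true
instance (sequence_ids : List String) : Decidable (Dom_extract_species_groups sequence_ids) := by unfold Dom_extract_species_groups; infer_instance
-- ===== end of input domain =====

-- B replaces A's single incremental loop (dict building + inline color_index) by label-then-gather:
-- map ids to species labels, dedupe in first-appearance order, then build each group by filtering
-- the labelled list per species (objective: alternative decomposition, not faster).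

-- ===== PORT A =====
-- the module-level color palette
def pvColors : List String :=
  ["#2E86AB", "#A23B72", "#F18F01", "#C73E1D", "#8B5A2B",
   "#6A994E", "#BC4749", "#7209B7", "#F72585", "#4CC9F0",
   "#7B68EE", "#32CD32", "#FF6347", "#FFD700", "#DDA0DD"]

-- species name from a sequence id: identical lines in A and in B's species_of helper
-- (parts = seq_id.replace('_',' ').split(); first two tokens joined, or the single token, or seq_id)
def speciesOf (seq_id : String) : String :=
  let parts := PySem.Str.split₀ (PySem.Str.replace seq_id "_" " ")
  if parts.length ≥ 2 then
    PySem.Str.join " " [parts.getD 0 "", parts.getD 1 ""]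
  else if parts ≠ [] then parts.getD 0 "" else seq_id

def extract_species_groups (sequence_ids : List String) : (List (String × List String)) × (List (String × String)) :=
  let st := sequence_ids.foldl
    (fun (st : PySem.Dict String (List String) × PySem.Dict String String × Int) seq_id =>
      let sp := speciesOf seq_id
      let st' :=
        if st.1.contains sp = false then
          (st.1.insert sp ([] : List String),
           st.2.1.insert sp (PySem.List.pyGetD pvColors (PySem.Int.mod st.2.2 (PySem.List.len pvColors)) ""),
           st.2.2 + 1)
        else st
      (st'.1.modify sp [] (· ++ [seq_id]), st'.2.1, st'.2.2))
    ((PySem.Dict.empty : PySem.Dict String (List String)), (PySem.Dict.empty : PySem.Dict String String), (0 : Int))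
  (st.1.items, st.2.1.items)

-- ===== PORT B =====
def extract_species_groups_alt (sequence_ids : List String) : (List (String × List String)) × (List (String × String)) :=
  let pairs := sequence_ids.map (fun seq_id => (seq_id, speciesOf seq_id))
  let order := PySem.List.dedup (pairs.map (·.2))
  let species_groups := PySem.Dict.ofList
    (order.map (fun sp => (sp, (pairs.filter (fun q => q.2 == sp)).map (·.1))))
  let species_colors := PySem.Dict.ofList ((PySem.List.enumerate order 0).map
    (fun p => (p.2, PySem.List.pyGetD pvColors (PySem.Int.mod p.1 (PySem.List.len pvColors)) "")))
  (species_groups.items, species_colors.items)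

-- ===== PRECONDITION & SPEC =====
def Spec_extract_species_groups (sequence_ids : List String) (out : (List (String × List String)) × (List (String × String))) : Prop := out = extract_species_groups_alt sequence_ids
instance (sequence_ids : List String) (out : (List (String × List String)) × (List (String × String))) : Decidable (Spec_extract_species_groups sequence_ids out) := by unfold Spec_extract_species_groups; infer_instance

-- ===== CLAIM =====
def Claim_equal_extract_species_groups : Prop := ∀ (sequence_ids : List String), Dom_extract_species_groups sequence_ids → Spec_extract_species_groups sequence_ids (extract_species_groups sequence_ids)

-- ===== LEMMAS AND PROOFS =====

-- colors dict built from a key list (proof-side abbreviation shared by both sides)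
def mkColors (ks : List String) : PySem.Dict String String :=
  PySem.Dict.ofList ((PySem.List.enumerate ks 0).map
    (fun p => (p.2, PySem.List.pyGetD pvColors (PySem.Int.mod p.1 (PySem.List.len pvColors)) "")))

theorem mkColors_append (ks : List String) (sp : String) :
    mkColors (ks ++ [sp]) =
      (mkColors ks).insert sp
        (PySem.List.pyGetD pvColors (PySem.Int.mod (ks.length : Int) (PySem.List.len pvColors)) "") := by
  simp [mkColors, PySem.List.enumerate_append, PySem.Dict.ofList, PySem.Dict.update,
    List.foldl_append, PySem.List.enumerate]

-- A's loop from a synced state equals the plain modify-grouping loop plus mkColors of its keys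
set_option maxHeartbeats 1000000 in
theorem main_inv (l : List String) (g : PySem.Dict String (List String)) (hnd : g.keys.Nodup) :
    l.foldl
      (fun (st : PySem.Dict String (List String) × PySem.Dict String String × Int) seq_id =>
        let sp := speciesOf seq_id
        let st' :=
          if st.1.contains sp = false then
            (st.1.insert sp ([] : List String),
             st.2.1.insert sp (PySem.List.pyGetD pvColors (PySem.Int.mod st.2.2 (PySem.List.len pvColors)) ""),
             st.2.2 + 1)
          else st
        (st'.1.modify sp [] (· ++ [seq_id]), st'.2.1, st'.2.2))
      (g, mkColors g.keys, (g.keys.length : Int)) =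
    (let g' := l.foldl (fun g seq_id => g.modify (speciesOf seq_id) [] (· ++ [seq_id])) g
     (g', mkColors g'.keys, (g'.keys.length : Int))) := by
  induction l generalizing g with
  | nil => simp
  | cons x xs ih =>
    simp only [List.foldl_cons]
    by_cases h : g.contains (speciesOf x) = true
    · have hkeys : (g.modify (speciesOf x) [] (· ++ [x])).keys = g.keys := by
        rw [PySem.Dict.keys_modify, PySem.Dict.keys_insert_of_contains _ _ h]
      have := ih (g.modify (speciesOf x) [] (· ++ [x])) (by rw [hkeys]; exact hnd)
      simp only [h, Bool.true_eq_false, if_false, hkeys] at this ⊢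
      exact this
    · have h' : g.contains (speciesOf x) = false := by
        cases hc : g.contains (speciesOf x) <;> simp_all
      have heq : (g.insert (speciesOf x) ([] : List String)).modify (speciesOf x) [] (· ++ [x])
          = g.modify (speciesOf x) [] (· ++ [x]) := by
        simp only [PySem.Dict.modify, PySem.Dict.getD_insert_self, PySem.Dict.insert_insert_self,
          PySem.Dict.getD_of_not_contains g _ h']
      have hkeys : (g.modify (speciesOf x) [] (· ++ [x])).keys = g.keys ++ [speciesOf x] := by
        rw [PySem.Dict.keys_modify, PySem.Dict.keys_insert_of_not_contains _ _ h']
      have hnd' : (g.modify (speciesOf x) [] (· ++ [x])).keys.Nodup := by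
        rw [hkeys]
        refine List.Nodup.append hnd (List.nodup_singleton _) ?_
        intro a ha hb
        rw [List.mem_singleton] at hb
        subst hb
        exact absurd ((PySem.Dict.contains_iff_mem_keys g _).mpr ha) (by simp [h'])
      have := ih (g.modify (speciesOf x) [] (· ++ [x])) hnd'
      simp only [h', if_true, heq, hkeys, mkColors_append,
        List.length_append, List.length_singleton] at this ⊢
      push_cast at this ⊢
      exact this

theorem mkColors_nil : mkColors [] = PySem.Dict.empty := rfl

-- a dict comprehension over distinct keys: its items ARE the comprehension list
theorem items_ofList_nodup {ν : Type} (l : List (String × ν)) (h : (l.map (·.1)).Nodup) :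
    (PySem.Dict.ofList l).items = l := by
  have := PySem.Dict.items_foldl_insert_fresh (l := l) (d := PySem.Dict.empty)
    (k := (·.1)) (v := (·.2)) (by simp) h
  simpa [PySem.Dict.ofList] using this

-- ===== VERDICT =====
theorem extract_species_groups_spec : Claim_equal_extract_species_groups := by
  intro ids _
  unfold Spec_extract_species_groups extract_species_groups extract_species_groups_alt
  have h := main_inv ids PySem.Dict.empty PySem.Dict.nodup_keys_empty
  simp only [PySem.Dict.keys_empty, List.length_nil, Nat.cast_zero, mkColors_nil] at h
  simp only [h]
  -- the grouping fold, and B's labelled list / order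
  set g' := ids.foldl (fun g seq_id => g.modify (speciesOf seq_id) [] (· ++ [seq_id]))
    (PySem.Dict.empty : PySem.Dict String (List String)) with hg'
  have hpairs2 : (ids.map (fun seq_id => (seq_id, speciesOf seq_id))).map (·.2)
      = ids.map speciesOf := by simp [List.map_map]
  -- keys of the fold = deduped species labels in first-appearance order
  have hkeys : g'.keys = PySem.List.dedup (ids.map speciesOf) := by
    rw [hg', PySem.Dict.keys_foldl_modify_key]
    simp [PySem.Set.update_nil_left]
  have hnd : g'.keys.Nodup := by rw [hkeys]; exact PySem.List.nodup_dedup _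
  -- per-species value of the fold = the filter B's comprehension computes
  have hval : ∀ sp, g'.getD sp [] =
      ((ids.map (fun seq_id => (seq_id, speciesOf seq_id))).filter
        (fun q => q.2 == sp)).map (·.1) := by
    intro sp
    have hfold : g' = (ids.map (fun seq_id => (speciesOf seq_id, seq_id))).foldl
        (fun d p => d.modify p.1 [] (· ++ [p.2])) PySem.Dict.empty := by
      rw [hg', List.foldl_map]
    rw [hfold, PySem.Dict.getD_foldl_modify_append]
    simp [List.filter_map, List.map_map, Function.comp_def]
  -- items of the fold = B's group comprehension list
  have hitems : g'.items = (PySem.List.dedup ((ids.map (fun seq_id => (seq_id, speciesOf seq_id))).map (·.2))).map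
      (fun sp => (sp, ((ids.map (fun seq_id => (seq_id, speciesOf seq_id))).filter
        (fun q => q.2 == sp)).map (·.1))) := by
    rw [PySem.Dict.items_eq_map_keys g' hnd ([] : List String), hkeys, hpairs2]
    exact List.map_congr_left (fun sp _ => by rw [hval sp])
  -- B's two comprehension dicts have distinct keys, so their items are the lists themselves
  have hndord : (PySem.List.dedup ((ids.map (fun seq_id => (seq_id, speciesOf seq_id))).map (·.2))).Nodup :=
    PySem.List.nodup_dedup _
  refine Prod.ext ?_ ?_
  · rw [hitems, items_ofList_nodup]
    simp [List.map_map, Function.comp_def] at hndord ⊢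
  · show (mkColors g'.keys).items = _
    rw [hkeys, ← hpairs2]
    rfl
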